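-- pv_equiv track=rewrite | github.com/CESNET/lbr-testsuite | lbr_testsuite/dpdk_application/lcore_args.py | _determine_num_lcores_per_dev
-- ===== SOURCE A (Python) =====
-- from typing import Dict, List, Tuple
--
-- def _determine_num_lcores_per_dev(
--     pipeline_workers: int,
--     extra_workers: int,
--     devs: List[str],
-- ) -> Dict[str, int]:
--     """Determine the number of lcore workers per each device. In case the
--     total number of workers cannot be equally balanced, some devices may
--     receive one extra worker.
--     """
--
--     total_workers = pipeline_workers + extra_workers
--     workers_per_dev = total_workers // len(devs)
--     rem_workers = total_workers % len(devs)
--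
--     dev_map = {dev: workers_per_dev for dev in devs}
--     for dev in dev_map:
--         if rem_workers > 0:
--             dev_map[dev] += 1
--             rem_workers -= 1
--         else:
--             break
--
--     return dev_map
-- ===== SOURCE B (Python) =====
-- def _determine_num_lcores_per_dev(pipeline_workers, extra_workers, devs):
--     """Each unique device's worker count is computed independently as the
--     ceiling division ceil((total - i) / n) (i = the device's unique-order
--     index, n = len(devs)); no base/remainder bookkeeping is needed."""
--     total = pipeline_workers + extra_workers
--     n = len(devs)
--     out = {}
--     for dev in devs:
--         if dev not in out:
--             out[dev] = (total - len(out) + n - 1) // n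
--     return out
-- ===== Notes on version B (the rewrite author's own statement) =====
-- stated objective: alternative
-- what changed: Eliminates A's divmod base/remainder split and the counter-mutating break loop entirely: B computes each unique device's count independently by one closed-form ceiling division, count = (total - i + n - 1)//n with i the device's unique-order index, accumulated in a single dedup-as-you-go pass.
import Mathlib
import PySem

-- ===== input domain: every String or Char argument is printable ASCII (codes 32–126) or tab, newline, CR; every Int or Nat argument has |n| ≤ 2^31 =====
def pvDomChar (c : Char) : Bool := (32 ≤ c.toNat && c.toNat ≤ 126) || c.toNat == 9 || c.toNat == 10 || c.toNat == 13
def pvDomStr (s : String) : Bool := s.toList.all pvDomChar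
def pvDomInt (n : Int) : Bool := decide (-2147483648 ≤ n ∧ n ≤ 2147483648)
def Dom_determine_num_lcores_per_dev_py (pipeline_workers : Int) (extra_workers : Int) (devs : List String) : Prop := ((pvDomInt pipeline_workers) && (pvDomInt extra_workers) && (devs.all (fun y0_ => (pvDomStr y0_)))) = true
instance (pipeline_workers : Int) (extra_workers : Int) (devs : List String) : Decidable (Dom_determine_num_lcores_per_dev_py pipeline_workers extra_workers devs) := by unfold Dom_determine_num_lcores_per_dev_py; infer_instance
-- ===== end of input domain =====

-- B drops A's base+remainder bookkeeping: each unique device's count is one closed-form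
-- ceiling division by its unique-order index (objective: alternative; same O(n) cost).

-- ===== PORT A =====
-- the `for dev in dev_map: if rem_workers > 0: dev_map[dev] += 1; rem_workers -= 1 else: break`
-- loop, over a snapshot of the keys (mutating values does not change the keys);
-- `dev_map[dev] += 1` is insert dev (getD dev 0 + 1), exact here because dev is always a present key.
def pyLoopA : List String → PySem.Dict String Int → Int → PySem.Dict String Int
  | [], dev_map, _ => dev_map
  | dev :: rest, dev_map, rem_workers =>
    if rem_workers > 0 then
      pyLoopA rest (dev_map.insert dev (dev_map.getD dev 0 + 1)) (rem_workers - 1)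
    else dev_map

def determine_num_lcores_per_dev_py (pipeline_workers : Int) (extra_workers : Int) (devs : List String) : List (String × Int) :=
  let total_workers := pipeline_workers + extra_workers
  let workers_per_dev := PySem.Int.floordiv total_workers (devs.length : Int)
  let rem_workers := PySem.Int.mod total_workers (devs.length : Int)
  let dev_map := devs.foldl (fun d dev => d.insert dev workers_per_dev) PySem.Dict.empty
  (pyLoopA dev_map.keys dev_map rem_workers).items

-- ===== PORT B =====
-- `for dev in devs: if dev not in out: out[dev] = (total - len(out) + n - 1) // n`;
-- len(out) is out.size (the number of keys so far), `//` is PySem.Int.floordiv.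
def determine_num_lcores_per_dev_py_alt (pipeline_workers : Int) (extra_workers : Int) (devs : List String) : List (String × Int) :=
  let total := pipeline_workers + extra_workers
  let n := (devs.length : Int)
  (devs.foldl (fun out dev =>
      if out.contains dev then out
      else out.insert dev (PySem.Int.floordiv (total - (out.size : Int) + n - 1) n))
    PySem.Dict.empty).items

-- ===== PRECONDITION & SPEC =====
-- Pre_ excludes only devs = [], where the Python A raises ZeroDivisionError (len(devs) is the divisor).
def Pre_determine_num_lcores_per_dev_py (pipeline_workers : Int) (extra_workers : Int) (devs : List String) : Prop := devs ≠ []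
instance (pipeline_workers : Int) (extra_workers : Int) (devs : List String) : Decidable (Pre_determine_num_lcores_per_dev_py pipeline_workers extra_workers devs) := by unfold Pre_determine_num_lcores_per_dev_py; infer_instance

def pvWitness_determine_num_lcores_per_dev_py : Int × Int × List String := (3, 1, ["eth0", "eth1", "eth2"])

def Spec_determine_num_lcores_per_dev_py (pipeline_workers : Int) (extra_workers : Int) (devs : List String) (out : List (String × Int)) : Prop := out = determine_num_lcores_per_dev_py_alt pipeline_workers extra_workers devs
instance (pipeline_workers : Int) (extra_workers : Int) (devs : List String) (out : List (String × Int)) : Decidable (Spec_determine_num_lcores_per_dev_py pipeline_workers extra_workers devs out) := by unfold Spec_determine_num_lcores_per_dev_py; infer_instance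

-- ===== CLAIM (what is proved, stated in full; the proofs are below) =====
def Claim_equal_determine_num_lcores_per_dev_py : Prop := ∀ (pipeline_workers : Int) (extra_workers : Int) (devs : List String), Dom_determine_num_lcores_per_dev_py pipeline_workers extra_workers devs → Pre_determine_num_lcores_per_dev_py pipeline_workers extra_workers devs → Spec_determine_num_lcores_per_dev_py pipeline_workers extra_workers devs (determine_num_lcores_per_dev_py pipeline_workers extra_workers devs)

-- ===== LEMMAS AND PROOFS =====

-- Layout of A's dict after the loop: first keys while rem > 0 hold v+1, the rest keep v.
def thrMap : List String → Int → Int → List (String × Int)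
  | [], _, _ => []
  | k :: ks, v, rem => if rem > 0 then (k, v + 1) :: thrMap ks v (rem - 1) else (k, v) :: thrMap ks v rem

theorem thrMap_nonpos (ks : List String) (v : Int) : ∀ rem : Int, ¬ rem > 0 → thrMap ks v rem = ks.map (fun k => (k, v)) := by
  induction ks with
  | nil => intro rem _; rfl
  | cons k ks ih => intro rem h; simp [thrMap, h, ih rem h]

theorem enum_map_nonpos (ks : List String) (v : Int) (t s : Int) (h : t ≤ s) :
    (PySem.List.enumerate ks s).map (fun p => (p.2, v + if p.1 < t then 1 else 0))
      = ks.map (fun k => (k, v)) := by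
  calc (PySem.List.enumerate ks s).map (fun p => (p.2, v + if p.1 < t then 1 else 0))
      = (PySem.List.enumerate ks s).map (fun p => (p.2, v)) := by
        apply List.map_congr_left
        intro p hp
        rcases (PySem.List.mem_enumerate_iff ks s p).1 hp with ⟨j, hj, rfl⟩
        have : ¬ ((s + (j : Int)) < t) := by omega
        simp [this]
    _ = ks.map (fun k => (k, v)) := by
        rw [show (fun p : Int × String => (p.2, v)) = (fun x => (x, v)) ∘ Prod.snd from rfl,
          ← List.map_map, PySem.List.map_snd_enumerate]

theorem thrMap_eq_enum (ks : List String) (v : Int) : ∀ rem s : Int,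
    thrMap ks v rem = (PySem.List.enumerate ks s).map (fun p => (p.2, v + if p.1 < s + rem then 1 else 0)) := by
  induction ks with
  | nil => intro rem s; simp [thrMap, PySem.List.enumerate_nil]
  | cons k ks ih =>
    intro rem s
    rw [PySem.List.enumerate_cons, List.map_cons]
    by_cases h : rem > 0
    · have h1 : s < s + rem := by omega
      have h2 : s + rem = (s + 1) + (rem - 1) := by omega
      simp only [thrMap, if_pos h, if_pos h1]
      rw [h2, ← ih (rem - 1) (s + 1)]
    · have h1 : ¬ s < s + rem := by omega
      simp only [thrMap, if_neg h, if_neg h1]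
      rw [thrMap_nonpos ks v rem h, enum_map_nonpos ks v (s + rem) (s + 1) (by omega)]
      simp

theorem loopA_items (v : Int) : ∀ (ks : List String) (pre : List (String × Int)) (rem : Int),
    (pre.map Prod.fst ++ ks).Nodup →
    (pyLoopA ks (PySem.Dict.mk (pre ++ ks.map (fun k => (k, v)))) rem).items = pre ++ thrMap ks v rem := by
  intro ks
  induction ks with
  | nil => intro pre rem _; simp [pyLoopA, thrMap]
  | cons k ks ih =>
    intro pre rem hnd
    by_cases h : rem > 0
    · have hknotpre : k ∉ pre.map Prod.fst := by
        have := List.disjoint_of_nodup_append hnd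
        exact fun hk => this hk (by simp)
      have hknotks : k ∉ ks := by
        have := (List.nodup_append.1 hnd).2.1
        simpa using (List.nodup_cons.1 this).1
      set d := PySem.Dict.mk (pre ++ (k :: ks).map (fun k => (k, v))) with hd
      have hitems : d.items = pre ++ (k, v) :: ks.map (fun k => (k, v)) := rfl
      have hkeys : d.keys = pre.map Prod.fst ++ k :: ks := by
        show (pre ++ (k :: ks).map (fun k => (k, v))).map Prod.fst = _
        simp [List.map_map, Function.comp_def]
      have hkeysnd : d.keys.Nodup := by rw [hkeys]; exact hnd
      have hmem : (k, v) ∈ d.items := by rw [hitems]; simp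
      have hget : d.getD k 0 = v := PySem.Dict.getD_of_mem_items d hmem hkeysnd 0
      have hc : d.contains k = true := by
        rw [PySem.Dict.contains_iff_mem_keys, hkeys]; simp
      have hins : (d.insert k (d.getD k 0 + 1)).items
          = (pre ++ [(k, v + 1)]) ++ ks.map (fun k => (k, v)) := by
        rw [PySem.Dict.items_insert_of_contains d _ hc, hget, hitems]
        rw [List.map_append, List.map_cons]
        have hpre : pre.map (fun p => if (p.1 == k) = true then (k, v + 1) else p) = pre := by
          conv_rhs => rw [← List.map_id pre]
          apply List.map_congr_left
          intro p hp
          have : p.1 ≠ k := fun hk => hknotpre (hk ▸ List.mem_map_of_mem hp)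
          simp [this, id]
        have hks : (ks.map (fun k => (k, v))).map (fun p => if (p.1 == k) = true then (k, v + 1) else p)
            = ks.map (fun k => (k, v)) := by
          rw [List.map_map]
          apply List.map_congr_left
          intro j hj
          have : j ≠ k := fun hk => hknotks (hk ▸ hj)
          simp [Function.comp, this]
        rw [hpre, hks]
        simp
      have hE : d.insert k (d.getD k 0 + 1)
          = PySem.Dict.mk ((pre ++ [(k, v + 1)]) ++ ks.map (fun k => (k, v))) :=
        PySem.Dict.ext hins
      show (pyLoopA (k :: ks) d rem).items = pre ++ thrMap (k :: ks) v rem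
      rw [show pyLoopA (k :: ks) d rem
            = pyLoopA ks (d.insert k (d.getD k 0 + 1)) (rem - 1) from by simp [pyLoopA, h]]
      rw [hE, ih (pre ++ [(k, v + 1)]) (rem - 1) (by simpa using hnd)]
      simp [thrMap, h]
    · simp only [pyLoopA, if_neg h]
      rw [thrMap_nonpos (k :: ks) v rem h]

theorem build_items (v : Int) (devs : List String) :
    (devs.foldl (fun d dev => d.insert dev v) PySem.Dict.empty).items
      = (PySem.Set.ofList devs).map (fun k => (k, v)) := by
  induction devs using List.reverseRecOn with
  | nil => rfl
  | append_singleton xs x ih =>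
    rw [List.foldl_append, List.foldl_cons, List.foldl_nil, PySem.Set.ofList_append_singleton]
    by_cases hx : x ∈ xs
    · have hc : (xs.foldl (fun d dev => d.insert dev v) PySem.Dict.empty).contains x = true := by
        rw [PySem.Dict.contains_iff_mem_keys, PySem.Dict.keys_foldl_insert xs (fun _ _ => v)]
        simp [PySem.Dict.keys_empty, PySem.Set.update_nil_left, PySem.Set.mem_ofList, hx]
      rw [PySem.Dict.items_insert_of_contains _ _ hc, ih]
      rw [show (PySem.Set.ofList xs).add x = PySem.Set.ofList xs from by simp [PySem.Set.add]; exact hx]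
      rw [List.map_map]
      apply List.map_congr_left
      intro j _
      by_cases hjx : j = x
      · simp [Function.comp, hjx]
      · simp [Function.comp, hjx]
    · have hc : (xs.foldl (fun d dev => d.insert dev v) PySem.Dict.empty).contains x = false := by
        rw [Bool.eq_false_iff]
        intro hcc
        rw [PySem.Dict.contains_iff_mem_keys, PySem.Dict.keys_foldl_insert xs (fun _ _ => v)] at hcc
        simp [PySem.Dict.keys_empty, PySem.Set.update_nil_left, PySem.Set.mem_ofList] at hcc
        exact hx hcc
      rw [PySem.Dict.items_insert_of_not_contains _ _ hc, ih]
      rw [show (PySem.Set.ofList xs).add x = PySem.Set.ofList xs ++ [x] from by simp [PySem.Set.add]; exact hx]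
      simp

theorem build_keys (v : Int) (devs : List String) :
    (devs.foldl (fun d dev => d.insert dev v) PySem.Dict.empty).keys = PySem.Set.ofList devs := by
  rw [PySem.Dict.keys_foldl_insert devs (fun _ _ => v), PySem.Dict.keys_empty, PySem.Set.update_nil_left]

-- B's fold: items are the deduped devices, each paired with the closed form at its index.
theorem altFold_items (t n : Int) (devs : List String) :
    (devs.foldl (fun out dev =>
        if out.contains dev then out
        else out.insert dev (PySem.Int.floordiv (t - (out.size : Int) + n - 1) n))
      PySem.Dict.empty).items
      = (PySem.List.enumerate (PySem.Set.ofList devs) 0).map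
          (fun p => (p.2, PySem.Int.floordiv (t - p.1 + n - 1) n)) := by
  induction devs using List.reverseRecOn with
  | nil => rfl
  | append_singleton xs x ih =>
    rw [List.foldl_append, List.foldl_cons, List.foldl_nil]
    set d := xs.foldl (fun out dev =>
        if out.contains dev then out
        else out.insert dev (PySem.Int.floordiv (t - (out.size : Int) + n - 1) n))
      PySem.Dict.empty with hd
    have hE : d = PySem.Dict.mk ((PySem.List.enumerate (PySem.Set.ofList xs) 0).map
        (fun p => (p.2, PySem.Int.floordiv (t - p.1 + n - 1) n))) := PySem.Dict.ext ih
    have hkeys : d.keys = PySem.Set.ofList xs := by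
      rw [hE]
      simp only [PySem.Dict.keys, List.map_map, Function.comp_def]
      exact PySem.List.map_snd_enumerate _ _
    have hcontains : d.contains x = decide (x ∈ xs) := by
      rw [PySem.Dict.contains_eq_decide_mem_keys, hkeys]
      simp [PySem.Set.mem_ofList]
    by_cases hx : x ∈ xs
    · have hc : d.contains x = true := by rw [hcontains]; simp [hx]
      rw [if_pos hc, ih,
        show (PySem.Set.ofList (xs ++ [x])) = PySem.Set.ofList xs from by
          rw [PySem.Set.ofList_append_singleton]; simp [PySem.Set.add]; exact hx]
    · have hc : d.contains x = false := by rw [hcontains]; simp [hx]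
      have hsize : (d.size : Int) = ((PySem.Set.ofList xs).length : Int) := by
        rw [hE]
        simp [PySem.Dict.size, PySem.List.length_enumerate]
      rw [if_neg (by simp [hc]),
        show (PySem.Set.ofList (xs ++ [x])) = PySem.Set.ofList xs ++ [x] from by
          rw [PySem.Set.ofList_append_singleton]; simp [PySem.Set.add]; exact hx]
      rw [PySem.Dict.items_insert_of_not_contains _ _ hc, ih, hsize]
      rw [PySem.List.enumerate_append, List.map_append]
      simp [PySem.List.enumerate_cons, PySem.List.enumerate_nil]

-- the closed form at index i equals base + (1 if i < rem else 0)
theorem ceil_split (t n i : Int) (hn : 0 < n) (hi : 0 ≤ i) (hin : i < n) :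
    PySem.Int.floordiv (t - i + n - 1) n
      = PySem.Int.floordiv t n + (if i < PySem.Int.mod t n then 1 else 0) := by
  have hqr := PySem.Int.floordiv_mul_add_mod t n
  have hr0 := PySem.Int.mod_nonneg t hn
  have hrn := PySem.Int.mod_lt t hn
  set q := PySem.Int.floordiv t n
  set r := PySem.Int.mod t n
  by_cases h : i < r
  · rw [if_pos h]
    rw [PySem.Int.floordiv_eq_iff_of_pos hn]
    constructor <;> nlinarith
  · rw [if_neg h]
    rw [PySem.Int.floordiv_eq_iff_of_pos hn]
    constructor <;> nlinarith

-- ===== VERDICT (by name: the statement is the Claim_ definition above) =====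
theorem determine_num_lcores_per_dev_py_spec : Claim_equal_determine_num_lcores_per_dev_py := by
  intro pw ew devs _ hpre
  unfold Spec_determine_num_lcores_per_dev_py determine_num_lcores_per_dev_py determine_num_lcores_per_dev_py_alt
  set v := PySem.Int.floordiv (pw + ew) (devs.length : Int) with hv
  set rem := PySem.Int.mod (pw + ew) (devs.length : Int) with hrem
  have hn : 0 < (devs.length : Int) := by
    have : devs.length ≠ 0 := fun h => hpre (List.length_eq_zero_iff.1 h)
    omega
  have hA : (pyLoopA (devs.foldl (fun d dev => d.insert dev v) PySem.Dict.empty).keys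
      (devs.foldl (fun d dev => d.insert dev v) PySem.Dict.empty) rem).items
    = (PySem.List.enumerate (PySem.Set.ofList devs) 0).map
        (fun p => (p.2, v + if p.1 < rem then 1 else 0)) := by
    have hE : devs.foldl (fun d dev => d.insert dev v) PySem.Dict.empty
        = PySem.Dict.mk ([] ++ (PySem.Set.ofList devs).map (fun k => (k, v))) :=
      PySem.Dict.ext (by simpa using build_items v devs)
    rw [build_keys v devs, hE,
      loopA_items v (PySem.Set.ofList devs) [] rem (by simpa using PySem.Set.nodup_ofList devs)]
    rw [thrMap_eq_enum (PySem.Set.ofList devs) v rem 0]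
    simp
  rw [hA, altFold_items (pw + ew) (devs.length : Int) devs]
  apply List.map_congr_left
  intro p hp
  rcases (PySem.List.mem_enumerate_iff _ _ p).1 hp with ⟨j, hj, rfl⟩
  have hjn : (j : Int) < (devs.length : Int) := by
    have hle := PySem.Set.length_ofList_le devs
    exact_mod_cast lt_of_lt_of_le hj (by exact_mod_cast hle)
  have := ceil_split (pw + ew) (devs.length : Int) ((j : Int)) hn (by positivity) (by omega)
  simp only [zero_add]
  rw [this, hv, hrem]
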